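-- pv_equiv track=rewrite | github.com/TatumHansen19/CST435React | RNN/backend/app/text_generator.py | _apply_capitalization
-- ===== SOURCE A (Python) =====
-- def _apply_capitalization(text: str) -> str:
--     """Apply capitalization rules to generated text.
--
--     Rules:
--     1. Capitalize standalone 'i' to 'I'
--     2. Capitalize first letter after periods (. ! ?)
--     3. Capitalize the first letter of the text
--
--     Args:
--         text: Generated text to capitalize
--
--     Returns:
--         Text with proper capitalization
--     """
--     if not text:
--         return text
--
--     # Split into words while preserving spaces
--     words = text.split()
--
--     if not words:
--         return text
--
--     # Capitalize first word
--     if words[0] and words[0][0].isalpha():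
--         words[0] = words[0][0].upper() + words[0][1:]
--
--     # Track if we need to capitalize next word (after sentence-ending punctuation)
--     capitalize_next = False
--
--     for i in range(len(words)):
--         word = words[i]
--
--         # Rule 1: Capitalize standalone 'i' to 'I'
--         if word == 'i':
--             words[i] = 'I'
--
--         # Rule 2: Capitalize after sentence-ending punctuation
--         if capitalize_next and word and word[0].isalpha():
--             words[i] = word[0].upper() + word[1:]
--             capitalize_next = False
--
--         # Check if this word ends with sentence-ending punctuation
--         if word and len(word) > 0:
--             # Check if word ends with . ! or ?
--             if word[-1] in '.!?':
--                 capitalize_next = True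
--             # Also handle case where punctuation is a separate token
--             elif word in '.!?':
--                 capitalize_next = True
--
--     return ' '.join(words)
-- ===== SOURCE B (Python) =====
-- def _apply_capitalization(text: str) -> str:
--     """Two-pass rewrite: first compute a capitalization flag per word, then map."""
--     if not text:
--         return text
--     words = text.split()
--     if not words:
--         return text
--     # flags[i]: word i should be capitalized if it starts with a letter.
--     # The flag set by sentence-ending punctuation persists until consumed by
--     # a word that starts with a letter.
--     flags = [True]
--     f = False
--     for w in words:
--         f = True if w[-1] in '.!?' else (f and not w[0].isalpha())
--         flags.append(f)
--     out = []
--     for w, cap in zip(words, flags):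
--         if cap and w[0].isalpha():
--             out.append(w[0].upper() + w[1:])
--         elif w == 'i':
--             out.append('I')
--         else:
--             out.append(w)
--     return ' '.join(out)
-- ===== Notes on version B (the rewrite author's own statement) =====
-- stated objective: simpler
-- what changed: Replaces A's single stateful in-place rewrite loop (mutating the word list while tracking capitalize_next, with a special pre-loop pass for the first word and a dead 'word in ".!?"' branch) by two clean passes: first compute a per-word capitalization flag list, then map each (word, flag) pair to its final form.
import Mathlib
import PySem

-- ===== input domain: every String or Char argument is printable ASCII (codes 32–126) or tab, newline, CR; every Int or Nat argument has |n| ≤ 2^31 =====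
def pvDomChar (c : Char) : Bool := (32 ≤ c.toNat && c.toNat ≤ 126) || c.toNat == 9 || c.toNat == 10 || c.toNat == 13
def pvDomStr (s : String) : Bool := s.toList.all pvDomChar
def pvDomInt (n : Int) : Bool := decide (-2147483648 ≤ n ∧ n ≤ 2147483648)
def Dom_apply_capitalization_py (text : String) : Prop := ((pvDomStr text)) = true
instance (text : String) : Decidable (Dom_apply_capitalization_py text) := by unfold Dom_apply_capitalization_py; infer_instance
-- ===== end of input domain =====

-- B replaces A's single stateful rewrite loop by two passes (a flag list, then a
-- pure per-word mapping); objective: simpler/alternative decomposition, same O(n) cost.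

-- shared small helpers (character-level, used by both ports)
def pvPunct : List Char := ['.', '!', '?']

-- Python 'word and word[0].isalpha()'
def pvStartsAlpha (w : List Char) : Bool :=
  match w with
  | [] => false
  | c :: _ => PySem.Chars.isalpha c

-- Python 'word[0].upper() + word[1:]' (guarded nonempty at every use)
def pvUpFirst (w : List Char) : List Char :=
  match w with
  | [] => []
  | c :: cs => PySem.Chars.upperChar c :: cs

-- ===== PORT A =====
-- A's for-loop over range(len(words)): each iteration reads words[i], possibly
-- rewrites it (rules 1 and 2) and updates capitalize_next; ported as a structural
-- recursion carrying the flag.  'word[-1]' = getLastD (guarded by w ≠ []).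
def pvLoopA : List (List Char) → Bool → List (List Char)
  | [], _ => []
  | w :: rest, capNext =>
    let w1 := if w = ['i'] then ['I'] else w
    let w2 := if capNext && pvStartsAlpha w then pvUpFirst w else w1
    let c1 := if capNext && pvStartsAlpha w then false else capNext
    let c2 := if w ≠ [] then
                (if w.getLastD ' ' ∈ pvPunct then true
                 else if PySem.Chars.isIn w pvPunct then true
                 else c1)
              else c1
    w2 :: pvLoopA rest c2

def apply_capitalization_py (text : String) : String :=
  if text.toList = [] then text
  else
    match PySem.Chars.split₀ text.toList with
    | [] => text
    | w0 :: rest =>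
      -- 'if words[0] and words[0][0].isalpha(): words[0] = words[0][0].upper() + words[0][1:]'
      let w0' := if pvStartsAlpha w0 then pvUpFirst w0 else w0
      String.ofList (PySem.Chars.join [' '] (pvLoopA (w0' :: rest) false))

-- ===== PORT B =====
-- pass 1 of Source B: the running flag f, one value appended per word
def pvFlagsB : List (List Char) → Bool → List Bool
  | [], _ => []
  | w :: rest, f =>
    let f' := if w.getLastD ' ' ∈ pvPunct then true else f && !pvStartsAlpha w
    f' :: pvFlagsB rest f'

-- pass 2 of Source B: the per-(word, cap) mapping
def pvEmitB (w : List Char) (cap : Bool) : List Char :=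
  if cap && pvStartsAlpha w then pvUpFirst w
  else if w = ['i'] then ['I']
  else w

def apply_capitalization_py_alt (text : String) : String :=
  if text.toList = [] then text
  else
    match PySem.Chars.split₀ text.toList with
    | [] => text
    | w0 :: rest =>
      let words := w0 :: rest
      let flags := true :: pvFlagsB words false
      String.ofList (PySem.Chars.join [' '] ((words.zip flags).map (fun p => pvEmitB p.1 p.2)))

-- ===== PRECONDITION & SPEC =====
def Spec_apply_capitalization_py (text : String) (out : String) : Prop := out = apply_capitalization_py_alt text
instance (text : String) (out : String) : Decidable (Spec_apply_capitalization_py text out) := by unfold Spec_apply_capitalization_py; infer_instance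

-- ===== CLAIM (what is proved, stated in full; the proofs are below) =====
def Claim_equal_apply_capitalization_py : Prop := ∀ (text : String), Dom_apply_capitalization_py text → Spec_apply_capitalization_py text (apply_capitalization_py text)

-- ===== LEMMAS AND PROOFS =====

-- every word produced by str.split() is nonempty
theorem pv_split₀_go_ne_nil (s cur : List Char) (acc : List (List Char))
    (hacc : ∀ w ∈ acc, w ≠ []) : ∀ w ∈ PySem.Chars.split₀.go s cur acc, w ≠ [] := by
  induction s generalizing cur acc with
  | nil =>
    intro w hw
    unfold PySem.Chars.split₀.go at hw
    split at hw
    · exact hacc w (List.mem_reverse.1 hw)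
    · rcases List.mem_cons.1 (List.mem_reverse.1 hw) with h | h
      · subst h
        next hcur =>
        simpa [List.isEmpty_iff] using fun h' => hcur (by simpa using congrArg List.reverse h')
      · exact hacc w h
  | cons c rest ih =>
    intro w hw
    unfold PySem.Chars.split₀.go at hw
    split at hw
    · split at hw
      · exact ih [] acc hacc w hw
      · refine ih [] (cur.reverse :: acc) ?_ w hw
        intro v hv
        rcases List.mem_cons.1 hv with h | h
        · subst h
          next hcur =>
          simpa [List.isEmpty_iff] using fun h' => hcur (by simpa using congrArg List.reverse h')
        · exact hacc v h
    · exact ih (c :: cur) acc hacc w hw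

theorem pv_split₀_ne_nil (s : List Char) : ∀ w ∈ PySem.Chars.split₀ s, w ≠ [] := by
  unfold PySem.Chars.split₀
  exact pv_split₀_go_ne_nil s [] [] (by intro w hw; cases hw)

theorem pv_getLastD_mem (l : List Char) (d : Char) (h : l ≠ []) : l.getLastD d ∈ l := by
  induction l generalizing d with
  | nil => simp at h
  | cons a t ih =>
    rw [List.getLastD_cons]
    cases t with
    | nil => simp
    | cons b u => exact List.mem_cons_of_mem a (ih a (by simp))

-- A's 'elif word in ".!?"' branch is dead: any nonempty infix of ".!?" already
-- ends with one of '.', '!', '?'.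
theorem pv_isIn_punct_dead (w : List Char) (hne : w ≠ [])
    (hlast : w.getLastD ' ' ∉ pvPunct) : PySem.Chars.isIn w pvPunct = false := by
  rw [PySem.Chars.isIn_eq_false_iff]
  intro hinf
  exact hlast (hinf.sublist.subset (pv_getLastD_mem w ' ' hne))

theorem pv_toNat_ofNat (n : Nat) (h : n < 55296) : (Char.ofNat n).toNat = n := by
  unfold Char.ofNat
  rw [dif_pos (Or.inl h)]
  rfl

theorem pv_islower_toNat (c : Char) (h : PySem.Chars.islower c = true) :
    97 ≤ c.toNat ∧ c.toNat ≤ 122 := by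
  simp only [PySem.Chars.islower, Bool.and_eq_true, decide_eq_true_eq, Char.le_def] at h
  exact ⟨h.1, h.2⟩

theorem pv_islower_of_toNat (c : Char) (h1 : 97 ≤ c.toNat) (h2 : c.toNat ≤ 122) :
    PySem.Chars.islower c = true := by
  simp only [PySem.Chars.islower, Bool.and_eq_true, decide_eq_true_eq, Char.le_def]
  exact ⟨h1, h2⟩

theorem pv_upperChar_ne_i (c : Char) : PySem.Chars.upperChar c ≠ 'i' := by
  unfold PySem.Chars.upperChar
  split
  · next h =>
    intro he
    have h1 := pv_islower_toNat c h
    have h2 := congrArg Char.toNat he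
    rw [pv_toNat_ofNat (c.toNat - 32) (by omega)] at h2
    have h3 : ('i').toNat = 105 := by decide
    omega
  · next h =>
    intro he
    subst he
    exact h (by decide)

theorem pv_isupper_toNat (c : Char) (h : PySem.Chars.isalpha c = true) :
    (65 ≤ c.toNat ∧ c.toNat ≤ 90) ∨ (97 ≤ c.toNat ∧ c.toNat ≤ 122) := by
  simp only [PySem.Chars.isalpha, PySem.Chars.isupper, PySem.Chars.islower, Bool.or_eq_true,
    Bool.and_eq_true, decide_eq_true_eq, Char.le_def] at h
  rcases h with h | h
  · exact Or.inl ⟨h.1, h.2⟩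
  · exact Or.inr ⟨h.1, h.2⟩

theorem pv_upperChar_toNat (c : Char) (h : PySem.Chars.isalpha c = true) :
    65 ≤ (PySem.Chars.upperChar c).toNat ∧ (PySem.Chars.upperChar c).toNat ≤ 122 := by
  unfold PySem.Chars.upperChar
  split
  · next hl =>
    have h1 := pv_islower_toNat c hl
    rw [pv_toNat_ofNat (c.toNat - 32) (by omega)]
    omega
  · next hl =>
    rcases pv_isupper_toNat c h with h1 | h1
    · omega
    · exact absurd (pv_islower_of_toNat c h1.1 h1.2) hl

theorem pv_mem_punct_toNat (c : Char) (h : c ∈ pvPunct) :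
    c.toNat = 46 ∨ c.toNat = 33 ∨ c.toNat = 63 := by
  simp only [pvPunct, List.mem_cons, List.not_mem_nil, or_false] at h
  rcases h with h | h | h <;> subst h <;> simp

theorem pv_alpha_notin_punct (c : Char) (h : PySem.Chars.isalpha c = true) : c ∉ pvPunct := by
  intro hc
  have h1 := pv_isupper_toNat c h
  have h2 := pv_mem_punct_toNat c hc
  omega

theorem pv_upperChar_notin_punct (c : Char) (h : PySem.Chars.isalpha c = true) :
    PySem.Chars.upperChar c ∉ pvPunct := by
  intro hc
  have h1 := pv_upperChar_toNat c h
  have h2 := pv_mem_punct_toNat _ hc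
  omega

-- the Bool identity behind A's flag-consume step
theorem pv_consume_eq (f a : Bool) : (if f && a then false else f) = (f && !a) := by
  cases f <;> cases a <;> rfl

-- core invariant: A's rewrite loop = zip of the words with B's flag list,
-- mapped through B's per-word function (all words nonempty)
theorem pv_loop_eq (ws : List (List Char)) :
    (∀ w ∈ ws, w ≠ []) → ∀ f : Bool,
    pvLoopA ws f = ((ws.zip (f :: pvFlagsB ws f)).map (fun p => pvEmitB p.1 p.2)) := by
  induction ws with
  | nil => intro _ f; rfl
  | cons w rest ih =>
    intro h f
    have hw : w ≠ [] := h w (List.mem_cons_self ..)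
    have hrest : ∀ v ∈ rest, v ≠ [] := fun v hv => h v (List.mem_cons_of_mem _ hv)
    show pvLoopA (w :: rest) f = _
    unfold pvLoopA pvFlagsB
    simp only [List.zip_cons_cons, List.map_cons]
    refine congrArg₂ _ rfl ?_
    -- the continuation flags agree
    have hflag : (if w ≠ [] then
            (if w.getLastD ' ' ∈ pvPunct then true
             else if PySem.Chars.isIn w pvPunct then true
             else if f && pvStartsAlpha w then false else f)
          else if f && pvStartsAlpha w then false else f) =
        (if w.getLastD ' ' ∈ pvPunct then true else f && !pvStartsAlpha w) := by
      rw [if_pos hw]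
      by_cases hl : w.getLastD ' ' ∈ pvPunct
      · rw [if_pos hl, if_pos hl]
      · rw [if_neg hl, if_neg hl, pv_isIn_punct_dead w hw hl]
        simp only [Bool.false_eq_true, if_false]
        exact pv_consume_eq f (pvStartsAlpha w)
    rw [hflag]
    exact ih hrest _

-- first word: A's pre-loop capitalization with loop flag false = B's cap = true
theorem pv_head_emit (w : List Char) (hw : w ≠ []) :
    pvEmitB (if pvStartsAlpha w then pvUpFirst w else w) false = pvEmitB w true := by
  by_cases ha : pvStartsAlpha w = true
  · rw [if_pos ha]
    cases w with
    | nil => simp at hw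
    | cons c cs =>
      have hc : PySem.Chars.isalpha c = true := ha
      unfold pvEmitB pvUpFirst pvStartsAlpha
      simp only [Bool.false_and, Bool.true_and, Bool.false_eq_true, if_false]
      rw [if_pos hc]
      rw [if_neg (by intro h; exact pv_upperChar_ne_i c (by injection h))]
  · rw [if_neg ha]
    have hi : w ≠ ['i'] := by
      intro h; subst h
      exact ha (by decide)
    unfold pvEmitB
    simp only [Bool.false_and, Bool.true_and, Bool.false_eq_true, if_false]
    rw [if_neg hi, if_neg ha]

-- first word: the flag it passes on is the same before and after A's pre-capitalization
theorem pv_head_flag (w : List Char) (hw : w ≠ []) :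
    ((if pvStartsAlpha w then pvUpFirst w else w).getLastD ' ' ∈ pvPunct) ↔
    (w.getLastD ' ' ∈ pvPunct) := by
  by_cases ha : pvStartsAlpha w = true
  · rw [if_pos ha]
    cases w with
    | nil => simp at hw
    | cons c cs =>
      have hc : PySem.Chars.isalpha c = true := ha
      cases cs with
      | nil =>
        unfold pvUpFirst
        simp only [List.getLastD_cons, List.getLastD_nil]
        constructor
        · intro h; exact absurd h (pv_upperChar_notin_punct c hc)
        · intro h; exact absurd h (pv_alpha_notin_punct c hc)
      | cons d ds =>
        unfold pvUpFirst
        rw [List.getLastD_cons, List.getLastD_cons, List.getLastD_cons, List.getLastD_cons]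
  · rw [if_neg ha]

-- ===== VERDICT (by name: the statement is the Claim_ definition above) =====
theorem apply_capitalization_py_spec : Claim_equal_apply_capitalization_py := by
  intro text _
  unfold Spec_apply_capitalization_py apply_capitalization_py apply_capitalization_py_alt
  by_cases h0 : text.toList = []
  · rw [if_pos h0, if_pos h0]
  rw [if_neg h0, if_neg h0]
  cases hs : PySem.Chars.split₀ text.toList with
  | nil => rfl
  | cons w0 rest =>
    have hall := pv_split₀_ne_nil text.toList
    rw [hs] at hall
    have hw0 : w0 ≠ [] := hall w0 (List.mem_cons_self ..)
    have hrest : ∀ v ∈ rest, v ≠ [] := fun v hv => hall v (List.mem_cons_of_mem _ hv)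
    have hw0' : (if pvStartsAlpha w0 then pvUpFirst w0 else w0) ≠ [] := by
      by_cases ha : pvStartsAlpha w0 = true
      · rw [if_pos ha]; cases w0 with
        | nil => simp at hw0
        | cons c cs => exact fun h => by cases h
      · rw [if_neg ha]; exact hw0
    refine congrArg String.ofList (congrArg _ ?_)
    rw [pv_loop_eq _ (by
      intro v hv
      rcases List.mem_cons.1 hv with h | h
      · subst h; exact hw0'
      · exact hrest v h) false]
    -- unfold both flag heads and compare element-wise
    unfold pvFlagsB
    have hf : (if (if pvStartsAlpha w0 then pvUpFirst w0 else w0).getLastD ' ' ∈ pvPunct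
          then true
          else false && !pvStartsAlpha (if pvStartsAlpha w0 then pvUpFirst w0 else w0)) =
        (if w0.getLastD ' ' ∈ pvPunct then true else false && !pvStartsAlpha w0) := by
      simp only [Bool.false_and]
      exact if_congr (pv_head_flag w0 hw0) rfl rfl
    rw [hf]
    simp only [List.zip_cons_cons, List.map_cons]
    rw [pv_head_emit w0 hw0]
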